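-- pv_equiv track=rewrite | github.com/PrisD/TP-Lexer-Parser | test.py | afd_num
-- ===== SOURCE A (Python) =====
-- ESTADO_NO_FINAL = 'ESTADO NO FINAL'
--
-- ESTADO_ACEPTADO = 'ESTADO ACEPTADO'
--
-- ESTADO_TRAMPA = 'ESTADO TRAMPA'
--
-- def afd_num (lexema):
--     estado_actual = 'A'
--     estado_final = 'Z'
--     estado_trampa = 'X'
--     for caracter in lexema:
--         if estado_actual == 'A' and caracter.isdigit():
--             estado_actual = 'Z'
--         elif estado_actual == 'A' and not caracter.isdigit():
--             estado_actual = 'X'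
--         elif estado_actual == 'Z' and caracter.isdigit():
--             estado_actual = 'Z'
--         elif estado_actual == 'Z' and not caracter.isdigit():
--             estado_actual = 'X'
--         elif estado_actual == 'X' and caracter.isascii():
--             estado_actual = 'X'
--     if  estado_actual == estado_final:
--         return ESTADO_ACEPTADO
--     elif estado_actual == estado_trampa:
--         return ESTADO_TRAMPA
--     else:
--         return ESTADO_NO_FINAL
-- ===== SOURCE B (Python) =====
-- ESTADO_NO_FINAL = 'ESTADO NO FINAL'
-- ESTADO_ACEPTADO = 'ESTADO ACEPTADO'
-- ESTADO_TRAMPA = 'ESTADO TRAMPA'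
--
-- def afd_num(lexema):
--     if not lexema:
--         return ESTADO_NO_FINAL
--     return ESTADO_ACEPTADO if all(c.isdigit() for c in lexema) else ESTADO_TRAMPA
-- ===== Notes on version B (the rewrite author's own statement) =====
-- stated objective: simpler
-- what changed: Replaces the explicit DFA state machine (state variable with five transition branches) by a direct classification: empty -> NO_FINAL, all digits -> ACEPTADO, else TRAMPA; all(...) short-circuits at the first non-digit.
import Mathlib
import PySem

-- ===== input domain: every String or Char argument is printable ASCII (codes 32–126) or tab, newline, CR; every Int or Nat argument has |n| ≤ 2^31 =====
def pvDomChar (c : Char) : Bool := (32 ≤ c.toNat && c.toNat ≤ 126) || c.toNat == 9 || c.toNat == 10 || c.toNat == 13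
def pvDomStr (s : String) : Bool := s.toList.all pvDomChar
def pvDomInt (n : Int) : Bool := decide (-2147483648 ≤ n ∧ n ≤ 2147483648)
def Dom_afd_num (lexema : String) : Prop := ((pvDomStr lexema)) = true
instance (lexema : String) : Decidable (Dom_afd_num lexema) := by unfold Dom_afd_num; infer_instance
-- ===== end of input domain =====

-- B replaces A's explicit DFA state machine by a direct classification (empty / all-digits / otherwise): simpler, same cost.

-- ===== PORT A =====
-- str.isascii() on a single char: code point ≤ 127 (exact)
def pyIsascii (c : Char) : Bool := c.toNat ≤ 127

def afdStep (estado : Char) (caracter : Char) : Char :=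
  if estado = 'A' ∧ PySem.Chars.isdigit caracter then 'Z'
  else if estado = 'A' ∧ ¬ PySem.Chars.isdigit caracter then 'X'
  else if estado = 'Z' ∧ PySem.Chars.isdigit caracter then 'Z'
  else if estado = 'Z' ∧ ¬ PySem.Chars.isdigit caracter then 'X'
  else if estado = 'X' ∧ pyIsascii caracter then 'X'
  else estado

def afd_num (lexema : String) : String :=
  let estado_actual := lexema.toList.foldl afdStep 'A'
  if estado_actual = 'Z' then "ESTADO ACEPTADO"
  else if estado_actual = 'X' then "ESTADO TRAMPA"
  else "ESTADO NO FINAL"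

-- ===== PORT B =====
def afd_num_alt (lexema : String) : String :=
  if lexema.toList = [] then "ESTADO NO FINAL"
  else if lexema.toList.all PySem.Chars.isdigit then "ESTADO ACEPTADO"
  else "ESTADO TRAMPA"

-- ===== PRECONDITION & SPEC =====
def Spec_afd_num (lexema : String) (out : String) : Prop := out = afd_num_alt lexema
instance (lexema : String) (out : String) : Decidable (Spec_afd_num lexema out) := by unfold Spec_afd_num; infer_instance

-- ===== CLAIM (what is proved, stated in full; the proofs are below) =====
def Claim_equal_afd_num : Prop := ∀ (lexema : String), Dom_afd_num lexema → Spec_afd_num lexema (afd_num lexema)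

-- ===== LEMMAS AND PROOFS =====
theorem foldl_afdStep_X (l : List Char) : l.foldl afdStep 'X' = 'X' := by
  induction l with
  | nil => rfl
  | cons c cs ih =>
    simp only [List.foldl_cons]
    have : afdStep 'X' c = 'X' := by
      simp only [afdStep]; split_ifs with h1 h2 h3 h4 h5 <;> first | rfl | (exfalso; simp_all)
    rw [this, ih]

theorem foldl_afdStep_Z (l : List Char) :
    l.foldl afdStep 'Z' = (if l.all PySem.Chars.isdigit then 'Z' else 'X') := by
  induction l with
  | nil => rfl
  | cons c cs ih =>
    simp only [List.foldl_cons, List.all_cons]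
    by_cases hd : PySem.Chars.isdigit c
    · have : afdStep 'Z' c = 'Z' := by
        simp only [afdStep]; split_ifs with h1 h2 <;> simp_all
      rw [this, ih]; simp [hd]
    · have : afdStep 'Z' c = 'X' := by
        simp only [afdStep]; split_ifs with h1 h2 h3 <;> simp_all
      simp only [this, foldl_afdStep_X]; simp [hd]

-- ===== VERDICT (by name: the statement is the Claim_ definition above) =====
theorem afd_num_spec : Claim_equal_afd_num := by
  intro lexema _
  unfold Spec_afd_num afd_num afd_num_alt
  cases h : lexema.toList with
  | nil => simp
  | cons c cs =>
    simp only [List.foldl_cons, reduceCtorEq, if_false]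
    by_cases hd : PySem.Chars.isdigit c
    · have : afdStep 'A' c = 'Z' := by
        simp only [afdStep]; split_ifs with h1 <;> simp_all
      simp only [this, foldl_afdStep_Z]
      by_cases hall : cs.all PySem.Chars.isdigit <;> simp [hall, hd]
    · have : afdStep 'A' c = 'X' := by
        simp only [afdStep]; split_ifs with h1 h2 <;> simp_all
      simp only [this, foldl_afdStep_X]
      simp [hd]
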